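-- pv_equiv track=rewrite | github.com/hjn5018/algorithms-solved | programmers/로또의_최고_순위와_최저_순위.py | solution
-- ===== SOURCE A (Python) =====
-- def solution(lottos, win_nums):
--     answer = []
--     ranking = {6:1, 5:2, 4:3, 3:4, 2:5, 1:6, 0:6}
--     min, max = 0, 0
--     for i in lottos:
--         if i == 0:
--             max += 1
--         else:
--             if i in win_nums:
--                 min += 1
--                 max += 1
--     answer.append(ranking[max])
--     answer.append(ranking[min])
--     return answer
-- ===== SOURCE B (Python) =====
-- def solution(lottos, win_nums):
--     zeros = lottos.count(0)
--     matches = sum(lottos.count(w) for w in set(win_nums) if w != 0)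
--     return [min(7 - matches - zeros, 6), min(7 - matches, 6)]
-- ===== Notes on version B (the rewrite author's own statement) =====
-- stated objective: alternative
-- what changed: Instead of scanning the lotto ticket once with a branching accumulator and a hard-coded ranking dict, B iterates over the deduplicated winning numbers, summing lottos.count(w) for each nonzero winning number (correct because win_nums membership is what matters and set() removes double counting), and maps counts to ranks with the closed form min(7-count,6).
-- outside the precondition, e.g. on solution([0, 0, 0, 0, 0, 0, 0], [1, 2, 3, 4, 5, 6]): A raises KeyError, B returns [0, 6]
import Mathlib
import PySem

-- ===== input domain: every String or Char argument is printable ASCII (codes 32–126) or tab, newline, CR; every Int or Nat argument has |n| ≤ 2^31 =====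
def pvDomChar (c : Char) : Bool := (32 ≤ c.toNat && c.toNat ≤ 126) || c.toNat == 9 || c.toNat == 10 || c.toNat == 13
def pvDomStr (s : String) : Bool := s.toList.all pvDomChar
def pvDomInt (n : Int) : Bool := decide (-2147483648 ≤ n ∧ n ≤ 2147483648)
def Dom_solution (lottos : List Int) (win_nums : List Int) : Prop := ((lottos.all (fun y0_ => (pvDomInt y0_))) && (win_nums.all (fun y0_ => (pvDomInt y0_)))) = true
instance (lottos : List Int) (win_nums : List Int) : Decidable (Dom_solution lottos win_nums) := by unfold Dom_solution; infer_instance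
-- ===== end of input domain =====

-- B replaces A's branching scan of the ticket + ranking dict by iterating over the deduplicated
-- winning numbers, summing lottos.count(w) for nonzero w, then the closed-form rank min(7-c,6); objective: alternative.

-- ===== PORT A =====
-- A's ranking dict literal
def rankingA : PySem.Dict Int Int :=
  PySem.Dict.ofList [(6,1),(5,2),(4,3),(3,4),(2,5),(1,6),(0,6)]

def solution (lottos : List Int) (win_nums : List Int) : List Int :=
  -- answer = []; min,max = 0,0; for i in lottos: …
  let st := lottos.foldl
    (fun (p : Int × Int) i =>
      if i = 0 then (p.1, p.2 + 1)
      else if win_nums.contains i then (p.1 + 1, p.2 + 1) else p) (0, 0)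
  -- ranking[max] / ranking[min] raise KeyError when the key is absent: Pre_solution excludes that, the 0 default is unreachable there
  [PySem.Dict.getD rankingA st.2 0, PySem.Dict.getD rankingA st.1 0]

-- ===== PORT B =====
def solution_alt (lottos : List Int) (win_nums : List Int) : List Int :=
  let zeros : Int := (lottos.count 0 : Int)
  -- sum(lottos.count(w) for w in set(win_nums) if w != 0): a sum over the set, order-independent
  let mt : Int := (PySem.Set.ofList win_nums).foldl
    (fun acc w => acc + (if w ≠ 0 then (lottos.count w : Int) else 0)) 0
  [min (7 - mt - zeros) 6, min (7 - mt) 6]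

-- ===== PRECONDITION & SPEC =====
-- Pre_ excludes inputs with more than 6 credited entries (zeros plus nonzero matches), on which A's ranking dict lookup raises KeyError.
def Pre_solution (lottos : List Int) (win_nums : List Int) : Prop :=
  lottos.count 0 + lottos.countP (fun n => !(n == 0) && win_nums.contains n) ≤ 6
instance (lottos : List Int) (win_nums : List Int) : Decidable (Pre_solution lottos win_nums) := by unfold Pre_solution; infer_instance
def pvWitness_solution : List Int × List Int := ([44, 1, 0, 0, 31, 25], [31, 10, 45, 1, 6, 19])

def Spec_solution (lottos : List Int) (win_nums : List Int) (out : List Int) : Prop := out = solution_alt lottos win_nums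
instance (lottos : List Int) (win_nums : List Int) (out : List Int) : Decidable (Spec_solution lottos win_nums out) := by unfold Spec_solution; infer_instance

-- ===== CLAIM (what is proved, stated in full; the proofs are below) =====
def Claim_equal_solution : Prop := ∀ (lottos : List Int) (win_nums : List Int), Dom_solution lottos win_nums → Pre_solution lottos win_nums → Spec_solution lottos win_nums (solution lottos win_nums)

-- ===== LEMMAS AND PROOFS =====

-- A's loop computes (matches, matches + zeros), shifted by the incoming accumulator.
lemma loopA (win_nums : List Int) (lottos : List Int) : ∀ (mn mx : Int),
    lottos.foldl
      (fun (p : Int × Int) i =>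
        if i = 0 then (p.1, p.2 + 1)
        else if win_nums.contains i then (p.1 + 1, p.2 + 1) else p) (mn, mx)
    = (mn + (lottos.countP (fun n => !(n == 0) && win_nums.contains n) : Int),
       mx + (lottos.countP (fun n => !(n == 0) && win_nums.contains n) : Int)
          + (lottos.count 0 : Int)) := by
  induction lottos with
  | nil => simp
  | cons h t ih =>
    intro mn mx
    simp only [List.foldl_cons, List.countP_cons, List.count_cons]
    by_cases h0 : h = 0
    · simp only [h0, beq_self_eq_true, Bool.not_true, Bool.false_and, ih]
      simp [Prod.ext_iff]; omega
    · cases hc : win_nums.contains h with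
      | true =>
        simp only [if_neg h0, hc, if_true, ih]
        have hb : (!(h == 0) && win_nums.contains h) = true := by
          rw [hc]; simp [h0]
        simp [hb, Prod.ext_iff]; omega
      | false =>
        simp only [if_neg h0, hc, if_false, ih]
        have hb : (!(h == 0) && win_nums.contains h) = false := by
          rw [hc]; simp
        simp [hb]; exact h0

-- per-element count decomposition: for w not in W, counting membership in w::W splits off lottos.count w
lemma countP_cons_notmem (w : Int) (W : List Int) (hw : w ∉ W) (lottos : List Int) :
    lottos.countP (fun n => !(n == 0) && (w :: W).contains n)
    = (if w ≠ 0 then lottos.count w else 0)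
      + lottos.countP (fun n => !(n == 0) && W.contains n) := by
  induction lottos with
  | nil => simp
  | cons h t ih =>
    rw [List.countP_cons, List.countP_cons, List.count_cons, ih]
    by_cases hhw : h = w
    · subst hhw
      have hWc : W.contains h = false := by
        simp only [List.contains_eq_mem, decide_eq_false_iff_not]; exact hw
      by_cases h0 : h = 0
      · simp [h0, hw]
      · simp [h0, hw]; omega
    · by_cases h0 : h = 0
      · have hw0 : ¬((0 : Int) = w) := h0 ▸ hhw
        simp [h0, hhw, hw0]
      · cases hc : W.contains h with
        | true =>
          have hm : h ∈ W := by simpa [List.contains_eq_mem] using hc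
          simp [h0, hhw, hm]; omega
        | false =>
          have hm : h ∉ W := by simpa [List.contains_eq_mem] using hc
          simp [h0, hhw, hm]

-- B's sum over the deduplicated winning numbers equals A's countP, for any nodup list
lemma sumB (lottos : List Int) : ∀ (W : List Int), W.Nodup → ∀ (a : Int),
    W.foldl (fun acc w => acc + (if w ≠ 0 then (lottos.count w : Int) else 0)) a
    = a + (lottos.countP (fun n => !(n == 0) && W.contains n) : Int) := by
  intro W
  induction W with
  | nil => intro _ a; simp
  | cons w W ih =>
    intro hnd a
    have hw : w ∉ W := (List.nodup_cons.mp hnd).1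
    have hnd' : W.Nodup := (List.nodup_cons.mp hnd).2
    simp only [List.foldl_cons, ih hnd',
      countP_cons_notmem w W hw lottos]
    push_cast
    by_cases h0 : w = 0 <;> simp [h0] <;> ring

-- the ranking dict is min(7-c,6) on keys 0..6
lemma rank_eq (c : Nat) (hc : c ≤ 6) :
    PySem.Dict.getD rankingA (c : Int) 0 = min (7 - (c : Int)) 6 := by
  interval_cases c <;> decide

-- ===== VERDICT (by name: the statement is the Claim_ definition above) =====
theorem solution_spec : Claim_equal_solution := by
  intro lottos win_nums _ hpre
  unfold Spec_solution solution solution_alt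
  simp only [loopA, zero_add]
  unfold Pre_solution at hpre
  have hmem : ∀ n : Int, List.contains (PySem.Set.ofList win_nums) n = win_nums.contains n := by
    intro n
    simp [List.contains_eq_mem, PySem.Set.mem_ofList]
  have hcp : lottos.countP (fun n => !(n == 0) && List.contains (PySem.Set.ofList win_nums) n)
      = lottos.countP (fun n => !(n == 0) && win_nums.contains n) := by
    apply List.countP_congr; intro n _; rw [hmem]
  rw [sumB lottos (PySem.Set.ofList win_nums) (PySem.Set.nodup_ofList _) 0, hcp]
  set M := lottos.countP (fun n => !(n == 0) && win_nums.contains n) with hM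
  set Z := lottos.count 0 with hZ
  have h1 : (M : Int) + (Z : Int) = ((M + Z : Nat) : Int) := by push_cast; ring
  rw [h1, rank_eq (M + Z) (by omega), rank_eq M (by omega)]
  have h2 : (7 : Int) - ((M + Z : Nat) : Int) = 7 - (M : Int) - (Z : Int) := by push_cast; ring
  rw [h2]
  simp
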